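-- pv_equiv track=rewrite | github.com/NREL/PowerGridworld | gridworld/agents/buildings/obs_space.py | _get_obs_dim
-- ===== SOURCE A (Python) =====
-- from typing import List, Dict
-- from typing import Union, Tuple
--
-- MULTIZONE_KEYS = ["zone_temp", "zone_upper_viol", "zone_lower_viol"]
--
-- def _get_obs_dim(
--         num_zones: int,
--         config: Union[List, Dict]) -> int:
--     """Returns the number of box dimensions for the given configuration params."""
--     dim = 0
--     for key in config:
--         if key in MULTIZONE_KEYS:
--             # These are zone-level variables
--             dim += num_zones
--         else:
--             # The rest are scalar variables
--             dim += 1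
--     return dim
-- ===== SOURCE B (Python) =====
-- MULTIZONE_KEYS = ["zone_temp", "zone_upper_viol", "zone_lower_viol"]
--
-- def _get_obs_dim(num_zones, config):
--     """Inverted traversal: one counting pass per multizone key, then combine."""
--     keys = list(config)
--     n_multi = 0
--     for mk in MULTIZONE_KEYS:
--         n_multi += keys.count(mk)
--     return num_zones * n_multi + (len(keys) - n_multi)
-- ===== Notes on version B (the rewrite author's own statement) =====
-- stated objective: alternative
-- what changed: Inverts the traversal: instead of one classify-and-accumulate pass over config, B loops over the three MULTIZONE_KEYS, counts each key's occurrences in config with list.count, and combines the counts algebraically as num_zones*n_multi + (len(config) - n_multi).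
import Mathlib
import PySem

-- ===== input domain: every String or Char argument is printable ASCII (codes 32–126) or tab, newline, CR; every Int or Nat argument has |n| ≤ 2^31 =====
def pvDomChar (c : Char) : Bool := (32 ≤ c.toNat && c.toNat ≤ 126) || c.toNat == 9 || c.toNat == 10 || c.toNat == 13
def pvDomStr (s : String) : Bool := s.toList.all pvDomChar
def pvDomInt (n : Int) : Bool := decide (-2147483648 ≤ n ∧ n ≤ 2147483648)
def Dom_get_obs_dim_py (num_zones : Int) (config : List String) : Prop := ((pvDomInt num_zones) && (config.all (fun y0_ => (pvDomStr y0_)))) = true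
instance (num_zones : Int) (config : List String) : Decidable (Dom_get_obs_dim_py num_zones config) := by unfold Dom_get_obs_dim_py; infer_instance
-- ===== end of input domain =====

-- B inverts the traversal: a counting pass per MULTIZONE_KEY via list.count, combined algebraically; objective: alternative.


-- ===== PORT A =====
-- MULTIZONE_KEYS = ["zone_temp", "zone_upper_viol", "zone_lower_viol"]
def MULTIZONE_KEYS : List String := ["zone_temp", "zone_upper_viol", "zone_lower_viol"]

def get_obs_dim_py (num_zones : Int) (config : List String) : Int :=
  config.foldl (fun dim key =>
    if MULTIZONE_KEYS.contains key then dim + num_zones else dim + 1) 0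

-- ===== PORT B =====
-- for mk in MULTIZONE_KEYS: n_multi += keys.count(mk); then num_zones*n_multi + (len - n_multi)
def get_obs_dim_py_alt (num_zones : Int) (config : List String) : Int :=
  let n_multi : Int :=
    MULTIZONE_KEYS.foldl (fun acc mk => acc + (PySem.List.count config mk : Int)) 0
  num_zones * n_multi + ((config.length : Int) - n_multi)

-- ===== PRECONDITION & SPEC =====
def Spec_get_obs_dim_py (num_zones : Int) (config : List String) (out : Int) : Prop := out = get_obs_dim_py_alt num_zones config
instance (num_zones : Int) (config : List String) (out : Int) : Decidable (Spec_get_obs_dim_py num_zones config out) := by unfold Spec_get_obs_dim_py; infer_instance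

-- ===== CLAIM (what is proved, stated in full; the proofs are below) =====
def Claim_equal_get_obs_dim_py : Prop := ∀ (num_zones : Int) (config : List String), Dom_get_obs_dim_py num_zones config → Spec_get_obs_dim_py num_zones config (get_obs_dim_py num_zones config)

-- ===== LEMMAS AND PROOFS =====
theorem foldl_dim (num_zones : Int) (config : List String) (acc : Int) :
    config.foldl (fun dim key =>
      if MULTIZONE_KEYS.contains key then dim + num_zones else dim + 1) acc
    = acc + num_zones * ((PySem.List.count config "zone_temp"
          + PySem.List.count config "zone_upper_viol"
          + PySem.List.count config "zone_lower_viol" : Nat) : Int)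
        + ((config.length : Int)
          - ((PySem.List.count config "zone_temp"
          + PySem.List.count config "zone_upper_viol"
          + PySem.List.count config "zone_lower_viol" : Nat) : Int)) := by
  induction config generalizing acc with
  | nil => simp [PySem.List.count]
  | cons h t ih =>
    simp only [List.foldl_cons, PySem.List.count, List.count_cons, List.length_cons] at *
    by_cases h1 : h = "zone_temp"
    · subst h1; simp only [ih]; norm_num [MULTIZONE_KEYS]; push_cast; ring
    · by_cases h2 : h = "zone_upper_viol"
      · subst h2; simp only [ih]; norm_num [MULTIZONE_KEYS]; push_cast; ring
      · by_cases h3 : h = "zone_lower_viol"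
        · subst h3; simp only [ih]; norm_num [MULTIZONE_KEYS]; push_cast; ring
        · have : MULTIZONE_KEYS.contains h = false := by
            simp [MULTIZONE_KEYS, h1, h2, h3]
          simp only [this, Bool.false_eq_true, if_neg, ih]
          simp only [beq_iff_eq, h1, h2, h3, if_false]
          push_cast; ring

-- ===== VERDICT (by name: the statement is the Claim_ definition above) =====
theorem get_obs_dim_py_spec : Claim_equal_get_obs_dim_py := by
  intro num_zones config _
  unfold Spec_get_obs_dim_py get_obs_dim_py get_obs_dim_py_alt
  rw [foldl_dim]
  simp only [MULTIZONE_KEYS, List.foldl_cons, List.foldl_nil]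
  push_cast; ring
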